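-- pv_equiv track=rewrite | github.com/jangwoopark/exercises-python | angry-children-2/angry-children-2.py | angryChildren
-- ===== SOURCE A (Python) =====
-- def angryChildren(n, k, packets):
--     packets.sort()
--     ps = [0]
--     for i in range(n):
--         ps.append(ps[-1] + packets[i])
--     cur = 0
--     for i in range(k):
--         cur += i * packets[i] - ps[i]
--     ans = cur
--     for i in range(1, n - k + 1):
--         cur -= ps[i + k - 1] - ps[i - 1] - k * packets[i - 1]
--         cur += k * packets[i + k - 1] - ps[i + k] + ps[i]
--         ans = min(ans, cur)
--     return ans
-- ===== SOURCE B (Python) =====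
-- def angryChildren(n, k, packets):
--     # Sorts packets in place like A; equivalence is about the return value.
--     packets.sort()
--     ans = sum((2 * j - (k - 1)) * packets[j] for j in range(k))
--     for i in range(1, n - k + 1):
--         w = sum((2 * j - (k - 1)) * packets[i + j] for j in range(k))
--         if w < ans:
--             ans = w
--     return ans
-- ===== Notes on version B (the rewrite author's own statement) =====
-- stated objective: simpler
-- what changed: Drops A's prefix-sum array and incremental sliding update; each sorted window's pairwise-difference sum is recomputed directly as the weighted sum sum_j (2j-(k-1))*packets[i+j], keeping only a running minimum.
import Mathlib
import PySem

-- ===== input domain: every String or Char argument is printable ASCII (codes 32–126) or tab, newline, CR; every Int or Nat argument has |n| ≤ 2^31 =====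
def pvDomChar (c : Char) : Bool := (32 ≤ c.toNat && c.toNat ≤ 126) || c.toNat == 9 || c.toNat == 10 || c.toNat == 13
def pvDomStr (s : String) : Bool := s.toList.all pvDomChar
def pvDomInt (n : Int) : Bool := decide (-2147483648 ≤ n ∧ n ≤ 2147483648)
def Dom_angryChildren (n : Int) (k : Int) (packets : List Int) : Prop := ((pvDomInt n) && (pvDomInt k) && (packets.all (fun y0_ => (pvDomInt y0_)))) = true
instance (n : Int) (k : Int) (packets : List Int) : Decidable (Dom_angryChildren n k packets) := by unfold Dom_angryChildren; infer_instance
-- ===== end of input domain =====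

-- B replaces A's prefix-sum array and incremental sliding update by recomputing each sorted
-- window's weighted sum sum_j (2j-(k-1))*s[i+j] directly with a running minimum (objective:
-- simpler; not faster). Both A and B sort `packets` in place; the equivalence proved here is
-- about the RETURN value (the mutation is identical anyway).

-- ===== PORT A =====
def angryChildren (n : Int) (k : Int) (packets : List Int) : Int :=
  let s := PySem.List.sorted packets (fun x => x)
  let ps := (PySem.List.pyRange 0 n).foldl
    (fun ps i => ps ++ [PySem.List.pyGetD ps (-1) 0 + PySem.List.pyGetD s i 0]) [0]
  let cur := (PySem.List.pyRange 0 k).foldl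
    (fun cur i => cur + i * PySem.List.pyGetD s i 0 - PySem.List.pyGetD ps i 0) 0
  ((PySem.List.pyRange 1 (n - k + 1)).foldl
    (fun st i =>
      let c1 := st.2 - (PySem.List.pyGetD ps (i + k - 1) 0 - PySem.List.pyGetD ps (i - 1) 0
                        - k * PySem.List.pyGetD s (i - 1) 0)
      let c2 := c1 + (k * PySem.List.pyGetD s (i + k - 1) 0 - PySem.List.pyGetD ps (i + k) 0
                      + PySem.List.pyGetD ps i 0)
      (min st.1 c2, c2)) (cur, cur)).1

-- ===== PORT B =====
def angryChildren_alt (n : Int) (k : Int) (packets : List Int) : Int :=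
  let s := PySem.List.sorted packets (fun x => x)
  let w : Int → Int := fun i => (PySem.List.pyRange 0 k).foldl
    (fun acc j => acc + (2 * j - (k - 1)) * PySem.List.pyGetD s (i + j) 0) 0
  (PySem.List.pyRange 1 (n - k + 1)).foldl
    (fun ans i => let v := w i; if v < ans then v else ans) (w 0)

-- ===== PRECONDITION & SPEC =====
-- Pre_ is exactly the set of inputs on which the Python A returns normally (everywhere else A
-- raises IndexError: n or k out of range of packets/prefix-sum list, including every k < 0 with
-- 0 ≤ n, whose negative indices still run off one of the lists).
def Pre_angryChildren (n : Int) (k : Int) (packets : List Int) : Prop :=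
  (0 ≤ n ∧ 0 ≤ k ∧ n ≤ (packets.length : Int) ∧ k ≤ (packets.length : Int) ∧ k ≤ n + 1)
  ∨ (n < 0 ∧ n ≤ k ∧ k ≤ 1 ∧ (k = 1 → 1 ≤ (packets.length : Int)))
instance (n : Int) (k : Int) (packets : List Int) : Decidable (Pre_angryChildren n k packets) := by
  unfold Pre_angryChildren; infer_instance
def pvWitness_angryChildren : Int × Int × List Int := (3, 2, [3, 1, 2])
def Spec_angryChildren (n : Int) (k : Int) (packets : List Int) (out : Int) : Prop := out = angryChildren_alt n k packets
instance (n : Int) (k : Int) (packets : List Int) (out : Int) : Decidable (Spec_angryChildren n k packets out) := by unfold Spec_angryChildren; infer_instance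

-- ===== CLAIM (what is proved, stated in full; the proofs are below) =====
def Claim_equal_angryChildren : Prop := ∀ (n : Int) (k : Int) (packets : List Int), Dom_angryChildren n k packets → Pre_angryChildren n k packets → Spec_angryChildren n k packets (angryChildren n k packets)

-- ===== LEMMAS AND PROOFS =====

def pvG (s : List Int) (j : ℕ) : Int := s.getD j 0
def pvP (s : List Int) (i : ℕ) : Int := ∑ j ∈ Finset.range i, pvG s j
def pvW (s : List Int) (k t : ℕ) : Int :=
  ∑ j ∈ Finset.range k, (2 * (j : Int) - ((k : Int) - 1)) * pvG s (t + j)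
def pvT (s : List Int) (k t : ℕ) : Int := ∑ j ∈ Finset.range k, pvG s (t + j)
def pvA (s : List Int) (k t : ℕ) : Int := ∑ j ∈ Finset.range k, (j : Int) * pvG s (t + j)

lemma pvP_succ (s : List Int) (i : ℕ) : pvP s (i + 1) = pvP s i + pvG s i := by
  rw [pvP, Finset.sum_range_succ, ← pvP]

lemma pvT_P (s : List Int) (k t : ℕ) : pvT s k t = pvP s (t + k) - pvP s t := by
  induction k with
  | zero => simp [pvT, pvP]
  | succ k ih =>
    rw [pvT, Finset.sum_range_succ, ← pvT, ih, show t + (k+1) = t + k + 1 from rfl, pvP_succ]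
    ring

lemma pvW_decomp (s : List Int) (k t : ℕ) :
    pvW s k t = 2 * pvA s k t - ((k : Int) - 1) * pvT s k t := by
  rw [pvW, pvA, pvT, Finset.mul_sum, Finset.mul_sum, ← Finset.sum_sub_distrib]
  exact Finset.sum_congr rfl (fun j _ => by ring)

lemma pvT_shift (s : List Int) (k t : ℕ) :
    pvT s k (t + 1) = pvT s (k + 1) t - pvG s t := by
  rw [pvT, pvT, Finset.sum_range_succ']
  have e : ∀ j : ℕ, pvG s (t + (j + 1)) = pvG s (t + 1 + j) := by
    intro j; congr 1; omega
  rw [Finset.sum_congr rfl (fun j _ => e j)]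
  simp

lemma pvA_shift (s : List Int) (k t : ℕ) :
    pvA s k (t + 1) = pvA s (k + 1) t - pvT s (k + 1) t + pvG s t := by
  have h : pvA s (k+1) t - pvT s (k+1) t
      = ∑ j ∈ Finset.range (k+1), ((j : Int) - 1) * pvG s (t + j) := by
    rw [pvA, pvT, ← Finset.sum_sub_distrib]
    exact Finset.sum_congr rfl (fun j _ => by ring)
  rw [h, Finset.sum_range_succ']
  have e : ∀ j : ℕ, (((j + 1 : ℕ) : Int) - 1) * pvG s (t + (j + 1))
      = (j : Int) * pvG s (t + 1 + j) := by
    intro j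
    have : t + (j + 1) = t + 1 + j := by omega
    rw [this]; push_cast; ring
  rw [Finset.sum_congr rfl (fun j _ => e j), pvA]
  push_cast; ring

lemma pvW_slide (s : List Int) (k t : ℕ) :
    pvW s k (t + 1) =
      pvW s k t - (pvP s (t + k) - pvP s t - (k : Int) * pvG s t)
        + ((k : Int) * pvG s (t + k) - pvP s (t + k + 1) + pvP s (t + 1)) := by
  have hA1 : pvA s (k + 1) t = pvA s k t + (k : Int) * pvG s (t + k) := by
    rw [pvA, Finset.sum_range_succ, ← pvA]
  have hT1 : pvT s (k + 1) t = pvT s k t + pvG s (t + k) := by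
    rw [pvT, Finset.sum_range_succ, ← pvT]
  have h1 : pvP s (t + k) - pvP s t = pvT s k t := (pvT_P s k t).symm
  have h2 : pvP s (t + k + 1) - pvP s (t + 1) = pvT s k t + pvG s (t + k) - pvG s t := by
    have h3 := pvT_P s k (t + 1)
    rw [show t + 1 + k = t + k + 1 from by omega] at h3
    rw [← h3, pvT_shift, hT1]
  rw [pvW_decomp, pvW_decomp, pvA_shift, pvT_shift, hA1, hT1]
  linear_combination h1 + h2


def pvPs (s : List Int) (m : ℕ) : List Int := (List.range (m + 1)).map (pvP s)

lemma pvPs_succ (s : List Int) (m : ℕ) : pvPs s (m + 1) = pvPs s m ++ [pvP s (m + 1)] := by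
  rw [pvPs, pvPs, List.range_succ (n := m + 1), List.map_append]; rfl

lemma psList (s : List Int) (m : ℕ) :
    (PySem.List.pyRange 0 (m : Int)).foldl
      (fun ps i => ps ++ [PySem.List.pyGetD ps (-1) 0 + PySem.List.pyGetD s i 0]) [0]
    = pvPs s m := by
  induction m with
  | zero => simp [PySem.List.pyRange_one_eq_nil, pvPs, pvP]
  | succ m ih =>
    rw [show ((m + 1 : ℕ) : Int) = (m : Int) + 1 from by push_cast; ring,
        PySem.List.pyRange_one_succ_right (by positivity), List.foldl_append, ih]
    simp only [List.foldl_cons, List.foldl_nil]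
    rw [pvPs_succ]
    congr 1
    rw [show pvPs s m = (List.range m).map (pvP s) ++ [pvP s m] from by
          rw [pvPs, List.range_succ, List.map_append]; rfl,
        PySem.List.pyGetD_neg_one_append_singleton, PySem.List.pyGetD_natCast]
    simp [pvP_succ, pvG, List.getD_eq_getElem?_getD]

lemma psGet (s : List Int) (m : ℕ) (i : Int) (h0 : 0 ≤ i) (h1 : i ≤ (m : Int)) :
    PySem.List.pyGetD (pvPs s m) i 0 = pvP s i.toNat := by
  rw [pvPs, show i = ((i.toNat : ℕ) : Int) from by omega, PySem.List.pyGetD_natCast,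
      PySem.List.getD_map_range _ _ _ _ (by omega)]
  congr 1

lemma curInv (s psl : List Int) (K : ℕ)
    (hps : ∀ j : ℕ, j < K → PySem.List.pyGetD psl (j : Int) 0 = pvP s j) :
    (PySem.List.pyRange 0 (K : Int)).foldl
      (fun cur i => cur + i * PySem.List.pyGetD s i 0 - PySem.List.pyGetD psl i 0) 0
    = ∑ i ∈ Finset.range K, ((i : Int) * pvG s i - pvP s i) := by
  induction K with
  | zero => simp [PySem.List.pyRange_one_eq_nil]
  | succ K ih =>
    rw [show ((K + 1 : ℕ) : Int) = (K : Int) + 1 from by push_cast; ring,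
        PySem.List.pyRange_one_succ_right (by positivity), List.foldl_append,
        ih (fun j hj => hps j (by omega))]
    simp only [List.foldl_cons, List.foldl_nil]
    rw [hps K (by omega), PySem.List.pyGetD_natCast, Finset.sum_range_succ]
    simp [pvG, List.getD_eq_getElem?_getD]
    ring

lemma curW (s : List Int) (K : ℕ) :
    (∑ i ∈ Finset.range K, ((i : Int) * pvG s i - pvP s i)) = pvW s K 0 := by
  induction K with
  | zero => simp [pvW]
  | succ K ih =>
    rw [Finset.sum_range_succ, ih]
    have h : pvW s (K + 1) 0
        = ∑ j ∈ Finset.range K, (2 * (j : Int) - ((K : Int) + 1 - 1)) * pvG s (0 + j)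
          + (2 * (K : Int) - ((K : Int) + 1 - 1)) * pvG s (0 + K) := by
      rw [pvW, Finset.sum_range_succ,
          Finset.sum_congr rfl (fun j (_ : j ∈ Finset.range K) =>
            show (2 * (j : Int) - (((K + 1 : ℕ) : Int) - 1)) * pvG s (0 + j)
              = (2 * (j : Int) - ((K : Int) + 1 - 1)) * pvG s (0 + j) from by push_cast; ring)]
      push_cast; ring
    rw [h]
    have h1 : ∀ j : ℕ, (2 * (j : Int) - ((K : Int) + 1 - 1)) * pvG s (0 + j)
        = (2 * (j : Int) - ((K : Int) - 1)) * pvG s (0 + j) - pvG s (0 + j) := by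
      intro j; ring
    rw [Finset.sum_congr rfl (fun j _ => h1 j), Finset.sum_sub_distrib]
    have e1 : ∑ j ∈ Finset.range K, (2 * (j : Int) - ((K : Int) - 1)) * pvG s (0 + j)
        = pvW s K 0 := by rw [pvW]
    have h2 : ∑ j ∈ Finset.range K, pvG s (0 + j) = pvP s K := by
      rw [pvP]; exact Finset.sum_congr rfl (fun j _ => by rw [Nat.zero_add])
    rw [e1, h2]
    simp only [Nat.zero_add]
    ring

lemma wSum (s : List Int) (c i : Int) (hi : 0 ≤ i) (K : ℕ) :
    (PySem.List.pyRange 0 (K : Int)).foldl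
      (fun acc j => acc + (2 * j - c) * PySem.List.pyGetD s (i + j) 0) 0
    = ∑ j ∈ Finset.range K, (2 * (j : Int) - c) * pvG s (i.toNat + j) := by
  induction K with
  | zero => simp [PySem.List.pyRange_one_eq_nil]
  | succ K ih =>
    rw [show ((K + 1 : ℕ) : Int) = (K : Int) + 1 from by push_cast; ring,
        PySem.List.pyRange_one_succ_right (by positivity), List.foldl_append, ih]
    simp only [List.foldl_cons, List.foldl_nil]
    rw [Finset.sum_range_succ,
        show i + (K : Int) = ((i.toNat + K : ℕ) : Int) from by push_cast; omega,
        PySem.List.pyGetD_natCast]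
    simp [pvG, List.getD_eq_getElem?_getD]

lemma wEq (s : List Int) (k i : Int) (hk : 0 ≤ k) (hi : 0 ≤ i) :
    (PySem.List.pyRange 0 k).foldl
      (fun acc j => acc + (2 * j - (k - 1)) * PySem.List.pyGetD s (i + j) 0) 0
    = pvW s k.toNat i.toNat := by
  rw [show k = ((k.toNat : ℕ) : Int) from by omega] 
  rw [wSum s _ i hi k.toNat, pvW]
  exact Finset.sum_congr rfl (fun j _ => by simp only [Int.toNat_natCast])


lemma loopEq (s : List Int) (N K : ℕ) (m : ℕ) (hm : (m : Int) ≤ (N : Int) - (K : Int)) :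
    ((PySem.List.pyRange 1 ((m : Int) + 1)).foldl
      (fun st i =>
        let c1 := st.2 - (PySem.List.pyGetD (pvPs s N) (i + (K : Int) - 1) 0
                          - PySem.List.pyGetD (pvPs s N) (i - 1) 0
                          - (K : Int) * PySem.List.pyGetD s (i - 1) 0)
        let c2 := c1 + ((K : Int) * PySem.List.pyGetD s (i + (K : Int) - 1) 0
                        - PySem.List.pyGetD (pvPs s N) (i + (K : Int)) 0
                        + PySem.List.pyGetD (pvPs s N) i 0)
        (min st.1 c2, c2)) (pvW s K 0, pvW s K 0))
    = (((PySem.List.pyRange 1 ((m : Int) + 1)).foldl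
        (fun ans i =>
          let v := (PySem.List.pyRange 0 (K : Int)).foldl
            (fun acc j => acc + (2 * j - ((K : Int) - 1)) * PySem.List.pyGetD s (i + j) 0) 0
          if v < ans then v else ans) (pvW s K 0)),
       pvW s K m) := by
  induction m with
  | zero =>
    rw [show ((0 : ℕ) : Int) + 1 = 1 from by norm_num, PySem.List.pyRange_one_eq_nil (by omega)]
    rfl
  | succ m ih =>
    have hm' : (m : Int) ≤ (N : Int) - (K : Int) := by push_cast at hm ⊢; omega
    rw [show ((m + 1 : ℕ) : Int) + 1 = ((m : Int) + 1) + 1 from by push_cast; ring,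
        PySem.List.pyRange_one_succ_right (by push_cast; omega), List.foldl_append, List.foldl_append,
        ih hm']
    simp only [List.foldl_cons, List.foldl_nil]
    have e1 : (m : Int) + 1 + (K : Int) - 1 = ((m + K : ℕ) : Int) := by push_cast; ring
    have e2 : (m : Int) + 1 - 1 = ((m : ℕ) : Int) := by push_cast; ring
    have e3 : (m : Int) + 1 + (K : Int) = ((m + K + 1 : ℕ) : Int) := by push_cast; ring
    have e4 : (m : Int) + 1 = ((m + 1 : ℕ) : Int) := by push_cast; ring
    have hb : (m : Int) + 1 ≤ (N : Int) - (K : Int) := by push_cast at hm ⊢; omega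
    rw [e1, e2, e3]
    rw [psGet s N _ (by push_cast; omega) (by push_cast; omega),
        psGet s N _ (by push_cast; omega) (by push_cast; omega),
        psGet s N _ (by push_cast; omega) (by push_cast; omega)]
    rw [e4, psGet s N _ (by push_cast; omega) (by push_cast; omega)]
    rw [PySem.List.pyGetD_natCast, PySem.List.pyGetD_natCast]
    rw [wEq s (K : Int) ((m + 1 : ℕ) : Int) (by push_cast; omega) (by push_cast; omega)]
    simp only [Int.toNat_natCast]
    have hW : pvW s K m
        - (pvP s (m + K) - pvP s m - (K : Int) * (s.getD m 0))
        + ((K : Int) * (s.getD (m + K) 0) - pvP s (m + K + 1) + pvP s (m + 1))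
        = pvW s K (m + 1) := by
      rw [pvW_slide]; simp only [pvG]
    rw [hW]
    have hmin : ∀ a v : Int, min a v = if v < a then v else a := by
      intro a v
      rcases lt_or_ge v a with h | h
      · rw [min_eq_right (le_of_lt h), if_pos h]
      · rw [min_eq_left h, if_neg (not_lt.mpr h)]
    rw [Prod.mk.injEq]
    exact ⟨hmin _ _, rfl⟩

lemma mainEq (n : Int) (k : Int) (packets : List Int) (hpre : Pre_angryChildren n k packets) :
    angryChildren n k packets = angryChildren_alt n k packets := by
  rcases hpre with ⟨h0, hk0, hnL, hkL, hkn⟩ | ⟨hn, hnk, hk1, hkL⟩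
  · -- main branch
    obtain ⟨N, rfl⟩ : ∃ N : ℕ, n = (N : Int) := ⟨n.toNat, by omega⟩
    obtain ⟨K, rfl⟩ : ∃ K : ℕ, k = (K : Int) := ⟨k.toNat, by omega⟩
    simp only [angryChildren, angryChildren_alt]
    rw [psList (PySem.List.sorted packets (fun x => x)) N]
    rw [curInv (PySem.List.sorted packets (fun x => x)) (pvPs (PySem.List.sorted packets (fun x => x)) N) K
        (fun j hj => by
          rw [psGet _ N (j : Int) (by omega) (by push_cast; omega)]
          simp only [Int.toNat_natCast])]
    rw [curW]
    rw [wEq (PySem.List.sorted packets (fun x => x)) (K : Int) 0 (by omega) (le_refl 0)]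
    simp only [Int.toNat_natCast, Int.toNat_zero]
    rcases lt_or_ge ((N : Int)) ((K : Int)) with hKN | hKN
    · rw [PySem.List.pyRange_one_eq_nil (by omega)]
      simp only [List.foldl_nil]
    · have e : (N : Int) - (K : Int) + 1 = ((N - K : ℕ) : Int) + 1 := by push_cast; omega
      rw [e, loopEq (PySem.List.sorted packets (fun x => x)) N K (N - K) (by push_cast; omega)]
  · -- degenerate branch: n < 0
    rcases (by omega : k ≤ 0 ∨ k = 1) with hk | hk
    · simp [angryChildren, angryChildren_alt,
        PySem.List.pyRange_one_eq_nil (show n ≤ (0 : Int) by omega),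
        PySem.List.pyRange_one_eq_nil (show k ≤ (0 : Int) by omega),
        PySem.List.pyRange_one_eq_nil (show n - k + 1 ≤ 1 by omega)]
    · subst hk
      simp [angryChildren, angryChildren_alt,
        PySem.List.pyRange_one_eq_nil (show n ≤ (0 : Int) by omega),
        PySem.List.pyRange_one_eq_nil (show n ≤ (1 : Int) by omega),
        show PySem.List.pyRange 0 1 = [0] from rfl,
        PySem.List.pyGetD]

-- ===== VERDICT (by name: the statement is the Claim_ definition above) =====
theorem angryChildren_spec : Claim_equal_angryChildren := by
  intro n k packets _ hpre
  unfold Spec_angryChildren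
  exact mainEq n k packets hpre
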